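-- pv_equiv track=rewrite | github.com/elYaro/Codewars-Katas-Python | 7 kyu/Printer_Errors.py | printer_error
-- ===== SOURCE A (Python) =====
-- def printer_error(s):
--     colors = ("abcdefghijklm")
--     error_count = 0
--     label_len = len(s)
--     for char in s:
--         if char not in colors:
--             error_count += 1
--     return "{0}/{1}".format(error_count, label_len)
-- ===== SOURCE B (Python) =====
-- def printer_error(s):
--     tally = {}
--     for ch in s:
--         tally[ch] = tally.get(ch, 0) + 1
--     errors = sum(n for ch, n in tally.items() if ch not in "abcdefghijklm")
--     return "{0}/{1}".format(errors, len(s))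
-- ===== Notes on version B (the rewrite author's own statement) =====
-- stated objective: idiomatic
-- what changed: B first builds a character frequency table in one pass and then sums the tallies of the distinct characters outside 'abcdefghijklm', instead of testing membership for every character in a running-counter loop.
import Mathlib
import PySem

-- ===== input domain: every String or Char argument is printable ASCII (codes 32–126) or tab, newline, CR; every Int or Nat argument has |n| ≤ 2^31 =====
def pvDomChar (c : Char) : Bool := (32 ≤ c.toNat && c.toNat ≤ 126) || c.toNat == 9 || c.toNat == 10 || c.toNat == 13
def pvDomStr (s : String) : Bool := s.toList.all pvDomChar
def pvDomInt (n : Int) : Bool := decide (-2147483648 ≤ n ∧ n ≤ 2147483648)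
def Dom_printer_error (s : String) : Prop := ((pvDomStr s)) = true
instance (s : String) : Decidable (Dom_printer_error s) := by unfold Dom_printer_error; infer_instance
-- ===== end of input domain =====

-- B builds a frequency table of the string first, then sums the tallies of the
-- distinct characters outside the good-color letters (idiomatic tally-table style); same cost.

-- ===== PORT A =====
def printer_error (s : String) : String :=
  let colors : String := "abcdefghijklm"
  let errorCount : Int :=
    s.toList.foldl (fun acc c =>
      if !(PySem.Str.isIn (String.ofList [c]) colors) then acc + 1 else acc) 0
  PySem.Int.toStr errorCount ++ "/" ++ PySem.Int.toStr ((PySem.Str.len s : Int))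

-- ===== PORT B =====
def printer_error_alt (s : String) : String :=
  let tally : PySem.Dict Char Int :=
    s.toList.foldl (fun d c => d.insert c (d.getD c 0 + 1)) PySem.Dict.empty
  let errors : Int :=
    ((tally.items.filter
        (fun kv => !(PySem.Str.isIn (String.ofList [kv.1]) "abcdefghijklm"))).map (·.2)).sum
  PySem.Int.toStr errors ++ "/" ++ PySem.Int.toStr ((PySem.Str.len s : Int))

-- ===== PRECONDITION & SPEC =====
def Spec_printer_error (s : String) (out : String) : Prop := out = printer_error_alt s
instance (s : String) (out : String) : Decidable (Spec_printer_error s out) := by unfold Spec_printer_error; infer_instance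

-- ===== CLAIM (what is proved, stated in full; the proofs are below) =====
def Claim_equal_printer_error : Prop := ∀ (s : String), Dom_printer_error s → Spec_printer_error s (printer_error s)

-- ===== LEMMAS AND PROOFS =====

/-- Summing, over a duplicate-free list `ys` that covers every `p`-element of `xs`,
the multiplicity in `xs` of each `p`-element of `ys` counts the `p`-elements of `xs`. -/
theorem sum_count_filter_eq_countP (p : Char → Bool) :
    ∀ (xs ys : List Char), ys.Nodup → (∀ x, x ∈ xs → p x = true → x ∈ ys) →
      ((ys.filter p).map (fun k => (xs.count k : Int))).sum = (xs.countP p : Int) := by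
  intro xs
  induction xs with
  | nil =>
      intro ys _ _
      simp
  | cons c xs ih =>
      intro ys hnd hcov
      have hcount : ∀ k : Char, (((c :: xs).count k : Int))
          = (xs.count k : Int) + (if k == c then (1:Int) else 0) := by
        intro k
        by_cases h : k = c
        · subst h; simp
        · have hb : (k == c) = false := beq_eq_false_iff_ne.mpr h
          have hb' : (c == k) = false := beq_eq_false_iff_ne.mpr (Ne.symm h)
          simp [List.count_cons, hb, hb']
      have hsplit : ((ys.filter p).map (fun k => ((c :: xs).count k : Int))).sum
          = ((ys.filter p).map (fun k => (xs.count k : Int))).sum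
            + ((ys.filter p).map (fun k => if k == c then (1:Int) else 0)).sum := by
        rw [← PySem.List.sum_map_add_int]
        exact congrArg List.sum (List.map_congr_left (fun k _ => hcount k))
      have hones : ((ys.filter p).map (fun k => if k == c then (1:Int) else 0)).sum
          = (if p c then (1:Int) else 0) := by
        rw [PySem.List.sum_map_ite_one_zero (fun k => k == c) (ys.filter p)]
        have hc : (ys.filter p).countP (fun k => k == c) = (ys.filter p).count c := rfl
        rw [hc]
        by_cases hpc : p c = true
        · have hmem : c ∈ ys.filter p := List.mem_filter.mpr ⟨hcov c (by simp) hpc, hpc⟩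
          rw [List.count_eq_one_of_mem (hnd.filter p) hmem]
          simp [hpc]
        · have h0 : (ys.filter p).count c = 0 := by
            apply List.count_eq_zero.mpr
            intro hm
            exact hpc (List.of_mem_filter hm)
          simp [h0, hpc]
      have hih := ih ys hnd (fun x hx hp => hcov x (by simp [hx]) hp)
      rw [hsplit, hih, hones, List.countP_cons]
      by_cases hpc : p c = true <;> simp [hpc]

theorem printer_error_spec : Claim_equal_printer_error := by
  intro s _
  unfold Spec_printer_error printer_error printer_error_alt
  simp only [PySem.List.foldl_if_add_one, PySem.Dict.foldl_insert_getD_add_one_eq_counter,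
    PySem.Dict.items_counter, List.filter_map, List.map_map, Function.comp_def]
  rw [sum_count_filter_eq_countP
      (fun c => !(PySem.Str.isIn (String.ofList [c]) "abcdefghijklm"))
      s.toList (PySem.Set.ofList s.toList) (PySem.Set.nodup_ofList _)
      (fun x hx _ => (PySem.Set.mem_ofList _ _).mpr hx)]
  simp

-- ===== VERDICT (by name: the statement is the Claim_ definition above) =====
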